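-- pv_equiv track=rewrite | github.com/avli/PyDev.Debugger | _pydevd_bundle/pydevd_utils.py | convert_dap_log_message_to_expression
-- ===== SOURCE A (Python) =====
-- def _extract_variable_nested_braces(char_iter):
--     expression = []
--     level = 0
--     for c in char_iter:
--         if c == '{':
--             level += 1
--         if c == '}':
--             level -= 1
--         if level == -1:
--             return ''.join(expression).strip()
--         expression.append(c)
--     raise SyntaxError('Unbalanced braces in expression.')
--
-- def _extract_expression_list(log_message):
--     # Note: not using re because of nested braces.
--     expression = []
--     expression_vars = []
--     char_iter = iter(log_message)
--     for c in char_iter: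
--         if c == '{':
--             expression_var = _extract_variable_nested_braces(char_iter)
--             if expression_var:
--                 expression.append('%s')
--                 expression_vars.append(expression_var)
--         else:
--             expression.append(c)
--
--     expression = ''.join(expression)
--     return expression, expression_vars
--
-- def convert_dap_log_message_to_expression(log_message):
--     try:
--         expression, expression_vars = _extract_expression_list(log_message)
--     except SyntaxError:
--         return repr('Unbalanced braces in: %s' % (log_message))
--     if not expression_vars:
--         return repr(expression)
--     # Note: use '%' to be compatible with Python 2.6.
--     return repr(expression) + ' % (' + ', '.join(str(x) for x in expression_vars) + ',)'
-- ===== SOURCE B (Python) =====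
-- def convert_dap_log_message_to_expression(log_message):
--     level = 0
--     output = []
--     expression_vars = []
--     buf = []
--     for c in log_message:
--         if level == 0:
--             if c == '{':
--                 level = 1
--                 buf = []
--             else:
--                 output.append(c)
--         elif c == '{':
--             level += 1
--             buf.append(c)
--         elif c == '}':
--             level -= 1
--             if level == 0:
--                 var = ''.join(buf).strip()
--                 if var:
--                     output.append('%s')
--                     expression_vars.append(var)
--             else:
--                 buf.append(c)
--         else:
--             buf.append(c)
--     if level > 0:
--         return repr('Unbalanced braces in: %s' % (log_message,))
--     expression = ''.join(output)
--     if not expression_vars: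
--         return repr(expression)
--     return repr(expression) + ' % (' + ', '.join(expression_vars) + ',)'
-- ===== Notes on version B (the rewrite author's own statement) =====
-- stated objective: simpler
-- what changed: Replaced A's two-function design, where the outer loop hands its character iterator to a nested-brace helper that consumes it and signals errors by exception, with one flat single-pass state machine over the characters that keeps a brace-nesting level, the output pieces, the expression variables and the current span buffer, reporting imbalance by the final level.
import Mathlib
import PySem

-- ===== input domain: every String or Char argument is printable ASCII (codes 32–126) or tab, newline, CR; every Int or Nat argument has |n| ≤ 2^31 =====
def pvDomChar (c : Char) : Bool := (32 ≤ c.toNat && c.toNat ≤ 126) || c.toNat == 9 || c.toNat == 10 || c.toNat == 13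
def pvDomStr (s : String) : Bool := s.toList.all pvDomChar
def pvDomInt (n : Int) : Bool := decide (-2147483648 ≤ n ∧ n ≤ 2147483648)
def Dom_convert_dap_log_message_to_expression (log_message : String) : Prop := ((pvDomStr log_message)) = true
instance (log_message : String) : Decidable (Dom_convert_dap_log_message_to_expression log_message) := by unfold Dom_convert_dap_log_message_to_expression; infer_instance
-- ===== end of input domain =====

-- B replaces A's two-function iterator-handoff parser with one flat single-pass
-- level-counting state machine over the characters (objective: simpler decomposition).

-- ===== PORT A =====

-- repr(s) for a Python str (exact on the ASCII-plus-tab/newline/CR domain): shared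
-- library-call helper for both ports.
def pyReprChars (cs : List Char) : List Char :=
  let q : Char := if cs.contains '\'' && !cs.contains '"' then '"' else '\''
  (q :: cs.flatMap (fun c =>
    if c = '\\' then ['\\', '\\']
    else if c = q then ['\\', q]
    else if c = '\t' then ['\\', 't']
    else if c = '\n' then ['\\', 'n']
    else if c = '\r' then ['\\', 'r']
    else [c])) ++ [q]

-- _extract_variable_nested_braces: the iterator is the remaining char list; returns the
-- stripped expression together with the unconsumed rest, or none for the SyntaxError.
def pvEvnb : List Char → Int → List Char → Option (List Char × List Char)
  | [], _, _ => none
  | c :: rest, level, expr =>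
    let level := if c = '{' then level + 1 else level
    let level := if c = '}' then level - 1 else level
    if level = -1 then some (PySem.Chars.strip expr, rest)
    else pvEvnb rest level (expr ++ [c])

theorem pvEvnb_length : ∀ (cs : List Char) (level : Int) (expr v rest : List Char),
    pvEvnb cs level expr = some (v, rest) → rest.length < cs.length := by
  intro cs
  induction cs with
  | nil => intro _ _ _ _ h; simp [pvEvnb] at h
  | cons c cs ih =>
      intro level expr v rest h
      simp only [pvEvnb] at h
      split_ifs at h
      all_goals
        first
          | (simp only [Option.some.injEq, Prod.mk.injEq] at h
             simp [← h.2])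
          | exact Nat.lt_succ_of_lt (ih _ _ _ _ h)

-- _extract_expression_list
def pvEel : List Char → List Char → List (List Char) → Option (List Char × List (List Char))
  | [], expr, vars => some (expr, vars)
  | c :: rest, expr, vars =>
    if c = '{' then
      match h : pvEvnb rest 0 [] with
      | none => none
      | some (v, rest') =>
        if v ≠ [] then pvEel rest' (expr ++ ['%', 's']) (vars ++ [v])
        else pvEel rest' expr vars
    else pvEel rest (expr ++ [c]) vars
termination_by cs => cs.length
decreasing_by
  · exact Nat.lt_succ_of_lt (pvEvnb_length _ _ _ _ _ h)
  · exact Nat.lt_succ_of_lt (pvEvnb_length _ _ _ _ _ h)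
  · simp

def convert_dap_log_message_to_expression (log_message : String) : String :=
  match pvEel log_message.toList [] [] with
  | none => String.mk (pyReprChars ("Unbalanced braces in: ".toList ++ log_message.toList))
  | some (expression, vars) =>
    if vars = [] then String.mk (pyReprChars expression)
    else String.mk (pyReprChars expression ++ " % (".toList
           ++ PySem.Chars.join ", ".toList vars ++ ",)".toList)

-- ===== PORT B =====

-- state: (level, output, expression_vars, buf)
def pvStep (s : Int × List Char × List (List Char) × List Char) (c : Char) :
    Int × List Char × List (List Char) × List Char :=
  let (level, output, vars, buf) := s
  if level = 0 then
    if c = '{' then (1, output, vars, [])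
    else (0, output ++ [c], vars, buf)
  else if c = '{' then (level + 1, output, vars, buf ++ [c])
  else if c = '}' then
    if level - 1 = 0 then
      let v := PySem.Chars.strip buf
      if v ≠ [] then (0, output ++ ['%', 's'], vars ++ [v], buf)
      else (0, output, vars, buf)
    else (level - 1, output, vars, buf ++ [c])
  else (level, output, vars, buf ++ [c])

def convert_dap_log_message_to_expression_alt (log_message : String) : String :=
  let r := log_message.toList.foldl pvStep (0, [], [], [])
  if r.1 > 0 then String.mk (pyReprChars ("Unbalanced braces in: ".toList ++ log_message.toList))
  else if r.2.2.1 = [] then String.mk (pyReprChars r.2.1)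
  else String.mk (pyReprChars r.2.1 ++ " % (".toList
         ++ PySem.Chars.join ", ".toList r.2.2.1 ++ ",)".toList)

-- ===== PRECONDITION & SPEC =====
def Spec_convert_dap_log_message_to_expression (log_message : String) (out : String) : Prop := out = convert_dap_log_message_to_expression_alt log_message
instance (log_message : String) (out : String) : Decidable (Spec_convert_dap_log_message_to_expression log_message out) := by unfold Spec_convert_dap_log_message_to_expression; infer_instance

-- ===== CLAIM (what is proved, stated in full; the proofs are below) =====
def Claim_equal_convert_dap_log_message_to_expression : Prop := ∀ (log_message : String), Dom_convert_dap_log_message_to_expression log_message → Spec_convert_dap_log_message_to_expression log_message (convert_dap_log_message_to_expression log_message)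

-- ===== LEMMAS AND PROOFS =====

-- Inside a brace span, B's machine at level lvl+1 tracks A's helper at level lvl over the
-- same accumulated buffer.
theorem pvInnerNone : ∀ (cs : List Char) (lvl : Int), 0 ≤ lvl →
    ∀ (buf out : List Char) (vars : List (List Char)),
    pvEvnb cs lvl buf = none →
    0 < (List.foldl pvStep (lvl + 1, out, vars, buf) cs).1 := by
  intro cs
  induction cs with
  | nil =>
      intro lvl hlvl buf out vars _
      simp only [List.foldl]
      omega
  | cons c cs ih =>
      intro lvl hlvl buf out vars h
      simp only [pvEvnb] at h
      have hne0 : ¬ (lvl + 1 = 0) := by omega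
      by_cases hob : c = '{'
      · subst hob
        rw [if_pos rfl, if_neg (by decide : ¬ ('{' : Char) = '}')] at h
        rw [if_neg (by omega : ¬ (lvl + 1 : Int) = -1)] at h
        simp only [List.foldl_cons, pvStep, if_neg hne0, if_pos rfl]
        have := ih (lvl + 1) (by omega) (buf ++ ['{']) out vars h
        have harith : (lvl + 1) + 1 = lvl + 1 + 1 := by ring
        rw [harith] at this
        exact this
      · rw [if_neg hob] at h
        by_cases hcb : c = '}'
        · subst hcb
          rw [if_pos rfl] at h
          by_cases hl0 : lvl = 0
          · rw [if_pos (by omega : (lvl - 1 : Int) = -1)] at h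
            exact absurd h (by simp)
          · rw [if_neg (by omega : ¬ (lvl - 1 : Int) = -1)] at h
            simp only [List.foldl_cons, pvStep, if_neg hne0,
              if_neg (by decide : ¬ ('}' : Char) = '{'), if_pos rfl,
              if_neg (by omega : ¬ (lvl + 1 - 1 : Int) = 0)]
            have := ih (lvl - 1) (by omega) (buf ++ ['}']) out vars h
            have harith : (lvl - 1) + 1 = lvl + 1 - 1 := by ring
            rw [harith] at this
            exact this
        · rw [if_neg hcb, if_neg (by omega : ¬ (lvl : Int) = -1)] at h
          simp only [List.foldl_cons, pvStep, if_neg hne0, if_neg hob, if_neg hcb]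
          exact ih lvl hlvl (buf ++ [c]) out vars h

theorem pvInnerSome : ∀ (cs : List Char) (lvl : Int), 0 ≤ lvl →
    ∀ (buf out : List Char) (vars : List (List Char)) (v rest : List Char),
    pvEvnb cs lvl buf = some (v, rest) →
    ∃ buf', List.foldl pvStep (lvl + 1, out, vars, buf) cs =
      List.foldl pvStep (0, (if v = [] then out else out ++ ['%', 's']),
        (if v = [] then vars else vars ++ [v]), buf') rest := by
  intro cs
  induction cs with
  | nil =>
      intro lvl hlvl buf out vars v rest h
      simp [pvEvnb] at h
  | cons c cs ih =>
      intro lvl hlvl buf out vars v rest h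
      simp only [pvEvnb] at h
      have hne0 : ¬ (lvl + 1 = 0) := by omega
      by_cases hob : c = '{'
      · subst hob
        rw [if_pos rfl, if_neg (by decide : ¬ ('{' : Char) = '}')] at h
        rw [if_neg (by omega : ¬ (lvl + 1 : Int) = -1)] at h
        simp only [List.foldl_cons, pvStep, if_neg hne0, if_pos rfl]
        have := ih (lvl + 1) (by omega) (buf ++ ['{']) out vars v rest h
        have harith : (lvl + 1) + 1 = lvl + 1 + 1 := by ring
        rw [harith] at this
        exact this
      · rw [if_neg hob] at h
        by_cases hcb : c = '}'
        · subst hcb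
          rw [if_pos rfl] at h
          by_cases hl0 : lvl = 0
          · subst hl0
            rw [if_pos (by norm_num : ((0:Int) - 1) = -1)] at h
            simp only [Option.some.injEq, Prod.mk.injEq] at h
            obtain ⟨hv, hrest⟩ := h
            subst hrest
            refine ⟨buf, ?_⟩
            simp only [List.foldl_cons, pvStep,
              if_neg (by norm_num : ¬ ((0:Int) + 1 = 0)),
              if_neg (by decide : ¬ ('}' : Char) = '{'), if_pos rfl,
              if_pos (by norm_num : ((0:Int) + 1 - 1) = 0)]
            by_cases hv0 : PySem.Chars.strip buf = []
            · simp [hv0, ← hv]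
            · simp [hv0, ← hv]
          · rw [if_neg (by omega : ¬ (lvl - 1 : Int) = -1)] at h
            simp only [List.foldl_cons, pvStep, if_neg hne0,
              if_neg (by decide : ¬ ('}' : Char) = '{'), if_pos rfl,
              if_neg (by omega : ¬ (lvl + 1 - 1 : Int) = 0)]
            have := ih (lvl - 1) (by omega) (buf ++ ['}']) out vars v rest h
            have harith : (lvl - 1) + 1 = lvl + 1 - 1 := by ring
            rw [harith] at this
            exact this
        · rw [if_neg hcb, if_neg (by omega : ¬ (lvl : Int) = -1)] at h
          simp only [List.foldl_cons, pvStep, if_neg hne0, if_neg hob, if_neg hcb]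
          exact ih lvl hlvl (buf ++ [c]) out vars v rest h

def pvP3 (s : Int × List Char × List (List Char) × List Char) :
    Int × List Char × List (List Char) := (s.1, s.2.1, s.2.2.1)

-- At level 0, B's machine tracks A's outer loop; buf is dead state there.
theorem pvOuterNone : ∀ (cs out : List Char) (vars : List (List Char)),
    pvEel cs out vars = none → ∀ (buf : List Char),
    0 < (List.foldl pvStep (0, out, vars, buf) cs).1 := by
  intro cs out vars
  induction cs, out, vars using pvEel.induct with
  | case1 expr vars =>
      intro h; simp [pvEel] at h
  | case2 rest expr vars h =>
      intro _ buf
      simp only [List.foldl_cons, pvStep, reduceIte]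
      have := pvInnerNone rest 0 (le_refl 0) [] expr vars h
      rw [show (0:Int) + 1 = 1 from rfl] at this
      exact this
  | case3 rest expr vars v rest' h hv ih =>
      intro heel buf
      rw [pvEel, if_pos rfl, h] at heel
      simp only [] at heel
      rw [if_pos hv] at heel
      simp only [List.foldl_cons, pvStep, reduceIte]
      obtain ⟨buf', heq⟩ := pvInnerSome rest 0 (le_refl 0) [] expr vars v rest' h
      rw [show (0:Int) + 1 = 1 from rfl] at heq
      rw [heq]
      have hv' : ¬ (v = []) := hv
      simp only [if_neg hv']
      exact ih heel buf'
  | case4 rest expr vars v rest' h hv ih =>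
      intro heel buf
      rw [pvEel, if_pos rfl, h] at heel
      simp only [] at heel
      rw [if_neg hv] at heel
      simp only [List.foldl_cons, pvStep, reduceIte]
      obtain ⟨buf', heq⟩ := pvInnerSome rest 0 (le_refl 0) [] expr vars v rest' h
      rw [show (0:Int) + 1 = 1 from rfl] at heq
      rw [heq]
      have hv' : v = [] := by simpa using hv
      simp only [if_pos hv']
      exact ih heel buf'
  | case5 c rest expr vars hc ih =>
      intro heel buf
      rw [pvEel, if_neg hc] at heel
      simp only [List.foldl_cons, pvStep, reduceIte, if_neg hc]
      exact ih heel buf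

theorem pvOuterSome : ∀ (cs out : List Char) (vars : List (List Char))
    (e : List Char) (vs : List (List Char)),
    pvEel cs out vars = some (e, vs) → ∀ (buf : List Char),
    pvP3 (List.foldl pvStep (0, out, vars, buf) cs) = (0, e, vs) := by
  intro cs out vars
  induction cs, out, vars using pvEel.induct with
  | case1 expr vars =>
      intro e vs h buf
      simp only [pvEel, Option.some.injEq, Prod.mk.injEq] at h
      simp [List.foldl, pvP3, h.1, h.2]
  | case2 rest expr vars h =>
      intro e vs heel buf
      rw [pvEel, if_pos rfl, h] at heel
      simp at heel
  | case3 rest expr vars v rest' h hv ih =>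
      intro e vs heel buf
      rw [pvEel, if_pos rfl, h] at heel
      simp only [] at heel
      rw [if_pos hv] at heel
      simp only [List.foldl_cons, pvStep, reduceIte]
      obtain ⟨buf', heq⟩ := pvInnerSome rest 0 (le_refl 0) [] expr vars v rest' h
      rw [show (0:Int) + 1 = 1 from rfl] at heq
      rw [heq]
      have hv' : ¬ (v = []) := hv
      simp only [if_neg hv']
      exact ih e vs heel buf'
  | case4 rest expr vars v rest' h hv ih =>
      intro e vs heel buf
      rw [pvEel, if_pos rfl, h] at heel
      simp only [] at heel
      rw [if_neg hv] at heel
      simp only [List.foldl_cons, pvStep, reduceIte]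
      obtain ⟨buf', heq⟩ := pvInnerSome rest 0 (le_refl 0) [] expr vars v rest' h
      rw [show (0:Int) + 1 = 1 from rfl] at heq
      rw [heq]
      have hv' : v = [] := by simpa using hv
      simp only [if_pos hv']
      exact ih e vs heel buf'
  | case5 c rest expr vars hc ih =>
      intro e vs heel buf
      rw [pvEel, if_neg hc] at heel
      simp only [List.foldl_cons, pvStep, reduceIte, if_neg hc]
      exact ih e vs heel buf

theorem convert_dap_log_message_to_expression_spec : Claim_equal_convert_dap_log_message_to_expression := by
  intro log_message _
  unfold Spec_convert_dap_log_message_to_expression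
  unfold convert_dap_log_message_to_expression convert_dap_log_message_to_expression_alt
  rcases heel : pvEel log_message.toList [] [] with _ | ⟨e, vs⟩
  · have h := pvOuterNone log_message.toList [] [] heel []
    simp only []
    rw [if_pos h]
  · have h := pvOuterSome log_message.toList [] [] e vs heel []
    simp only [pvP3, Prod.mk.injEq] at h
    obtain ⟨h1, h2, h3⟩ := h
    simp only [h1, h2, h3]
    norm_num
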